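-- pv_equiv track=rewrite | github.com/bubpen/codekata | 프로그래머스/0/120869. 외계어 사전/외계어 사전.py | solution
-- ===== SOURCE A (Python) =====
-- def solution(spell, dic):
--     cnt = []
--     alright = []
--     for i in range(len(dic)):
--         cnt.append([])
--     for i in spell:
--         alright.append(1)
--         for j in range(len(dic)):
--             cnt[j].append(dic[j].count(i))
--     if alright in cnt:
--         return 1
--     else:
--         return 2
-- ===== SOURCE B (Python) =====
-- def occurs_exactly_once(word, c):
--     p = word.find(c)
--     if p < 0:
--         return False
--     # search again past the first occurrence (step at least 1 so the empty
--     # needle makes progress); exactly one occurrence iff nothing is found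
--     return word.find(c, p + max(len(c), 1)) < 0
--
-- def solution(spell, dic):
--     for word in dic:
--         if all(occurs_exactly_once(word, c) for c in spell):
--             return 1
--     return 2
-- ===== Notes on version B (the rewrite author's own statement) =====
-- stated objective: alternative
-- what changed: B replaces A's count matrix and all-ones membership test (which fully counts every spell letter in every word) by a direct scan of dic that decides 'occurs exactly once' per letter with two str.find calls (find the first occurrence, then find nothing after it), returning 1 at the first matching word.
import Mathlib
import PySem

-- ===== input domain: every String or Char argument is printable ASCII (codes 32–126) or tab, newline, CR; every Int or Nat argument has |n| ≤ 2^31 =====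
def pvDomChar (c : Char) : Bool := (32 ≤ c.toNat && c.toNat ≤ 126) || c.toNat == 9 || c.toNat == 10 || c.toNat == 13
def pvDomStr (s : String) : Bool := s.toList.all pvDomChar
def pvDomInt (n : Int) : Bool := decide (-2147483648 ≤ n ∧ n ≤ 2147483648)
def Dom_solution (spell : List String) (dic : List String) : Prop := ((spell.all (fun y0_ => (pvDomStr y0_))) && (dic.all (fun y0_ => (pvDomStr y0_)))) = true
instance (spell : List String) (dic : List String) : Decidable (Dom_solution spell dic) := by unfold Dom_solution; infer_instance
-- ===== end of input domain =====

-- B: instead of A's count matrix and all-ones membership test, scan dic and decide "occurs exactly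
-- once" per spell letter with two str.find calls, returning 1 at the first matching word; alternative, same results.
-- ===== PORT A =====
def solution (spell : List String) (dic : List String) : Int :=
  -- cnt starts as one empty list per dictionary word; alright starts empty
  let st := spell.foldl
    (fun (st : List (List Int) × List Int) i =>
      (((st.1.zip dic).map (fun p => p.1 ++ [(PySem.Str.count p.2 i : Int)])),
       st.2 ++ [(1 : Int)]))
    (dic.map (fun _ => ([] : List Int)), ([] : List Int))
  if st.1.contains st.2 then 1 else 2

-- ===== PORT B =====
-- occurs_exactly_once(word, c): first occurrence exists, none after it (step ≥ 1)
def occursExactlyOnce (word c : String) : Bool :=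
  let p := PySem.Str.find word c
  if p < 0 then false
  else decide (PySem.Str.findFrom word c (p + max (PySem.Str.len c) 1) none < 0)

def solution_alt (spell : List String) (dic : List String) : Int :=
  if dic.any (fun w => spell.all (fun c => occursExactlyOnce w c)) then 1 else 2

-- ===== PRECONDITION & SPEC =====
def Spec_solution (spell : List String) (dic : List String) (out : Int) : Prop := out = solution_alt spell dic
instance (spell : List String) (dic : List String) (out : Int) : Decidable (Spec_solution spell dic out) := by unfold Spec_solution; infer_instance

-- ===== CLAIM (what is proved, stated in full; the proofs are below) =====
def Claim_equal_solution : Prop := ∀ (spell : List String) (dic : List String), Dom_solution spell dic → Spec_solution spell dic (solution spell dic)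

-- ===== LEMMAS AND PROOFS =====


lemma go_acc (sub : List Char) : ∀ (fuel : Nat) (s : List Char) (acc : Nat),
    PySem.Chars.count.go sub fuel s acc = acc + PySem.Chars.count.go sub fuel s 0 := by
  intro fuel
  induction fuel with
  | zero => intro s acc; cases s <;> simp [PySem.Chars.count.go]
  | succ f ih =>
      intro s acc
      cases s with
      | nil => simp [PySem.Chars.count.go]
      | cons h t =>
          simp only [PySem.Chars.count.go, Nat.zero_add]
          split
          · have h1 := ih (List.drop sub.length (h::t)) (acc+1)
            have h2 := ih (List.drop sub.length (h::t)) 1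
            omega
          · exact ih t acc

lemma go_fuel (sub : List Char) (hsub : sub ≠ []) :
    ∀ (fuel fuel' : Nat) (s : List Char) (acc : Nat), s.length ≤ fuel → s.length ≤ fuel' →
    PySem.Chars.count.go sub fuel s acc = PySem.Chars.count.go sub fuel' s acc := by
  intro fuel
  induction fuel with
  | zero =>
      intro fuel' s acc h h'
      have : s = [] := List.eq_nil_of_length_eq_zero (Nat.le_zero.mp h)
      subst this
      cases fuel' <;> simp [PySem.Chars.count.go]
  | succ f ih =>
      intro fuel' s acc h h'
      cases s with
      | nil => cases fuel' <;> simp [PySem.Chars.count.go]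
      | cons hd t =>
          cases fuel' with
          | zero => simp at h'
          | succ f' =>
              simp only [PySem.Chars.count.go]
              split
              · have hlen : 0 < sub.length := List.length_pos_of_ne_nil hsub
                apply ih <;> simp only [List.length_drop, List.length_cons] at * <;> omega
              · apply ih <;> simp at h h' ⊢ <;> omega


lemma count_cons (sub : List Char) (hsub : sub ≠ []) (h : Char) (t : List Char) :
    PySem.Chars.count (h :: t) sub =
      if sub.isPrefixOf (h :: t) then 1 + PySem.Chars.count (List.drop sub.length (h :: t)) sub
      else PySem.Chars.count t sub := by
  have hlen : 0 < sub.length := List.length_pos_of_ne_nil hsub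
  have hne : sub.isEmpty = false := by
    cases sub with
    | nil => exact absurd rfl hsub
    | cons a b => rfl
  simp only [PySem.Chars.count, hne, Bool.false_eq_true, if_false, List.length_cons]
  simp only [PySem.Chars.count.go]
  split
  · rw [go_acc,
       go_fuel sub hsub t.length (List.drop sub.length (h :: t)).length
         (List.drop sub.length (h :: t)) 0
         (by simp only [List.length_drop, List.length_cons]; omega) (le_refl _)]
  · exact go_fuel sub hsub t.length t.length t 0 (le_refl _) (le_refl _)

lemma findgo_off (sub : List Char) : ∀ (s : List Char) (k : Nat),
    PySem.Chars.find.go sub s k =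
      if PySem.Chars.find.go sub s 0 = -1 then -1 else k + PySem.Chars.find.go sub s 0 := by
  intro s
  induction s with
  | nil => intro k; by_cases h : sub.isEmpty <;> simp [PySem.Chars.find.go, h]
  | cons h t ih =>
      intro k
      by_cases hp : sub.isPrefixOf (h :: t)
      · simp [PySem.Chars.find.go, hp]
      · simp only [PySem.Chars.find.go, hp, Bool.false_eq_true, if_false]
        rw [ih (k+1), ih (0+1)]
        split
        · rfl
        · have hge : -1 ≤ PySem.Chars.find.go sub t 0 := PySem.Chars.neg_one_le_find t sub
          rw [if_neg (by omega)]
          push_cast; ring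

lemma find_cons (sub : List Char) (h : Char) (t : List Char) :
    PySem.Chars.find (h :: t) sub =
      if sub.isPrefixOf (h :: t) then 0
      else if PySem.Chars.find t sub = -1 then -1 else 1 + PySem.Chars.find t sub := by
  simp only [PySem.Chars.find, PySem.Chars.find.go]
  split
  · rfl
  · exact findgo_off sub t 1

lemma count_find (sub : List Char) (hsub : sub ≠ []) : ∀ (s : List Char),
    PySem.Chars.count s sub =
      if PySem.Chars.find s sub = -1 then 0
      else 1 + PySem.Chars.count (List.drop ((PySem.Chars.find s sub).toNat + sub.length) s) sub := by
  have hne : sub.isEmpty = false := by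
    cases sub with
    | nil => exact absurd rfl hsub
    | cons a b => rfl
  intro s
  induction s with
  | nil => simp [PySem.Chars.count, PySem.Chars.count.go, PySem.Chars.find, PySem.Chars.find.go, hne]
  | cons h t ih =>
      rw [count_cons sub hsub, find_cons sub]
      by_cases hp : sub.isPrefixOf (h :: t)
      · simp [hp]
      · simp only [hp, Bool.false_eq_true, if_false]
        by_cases hf : PySem.Chars.find t sub = -1
        · simp only [hf, if_true]
          rw [ih, if_pos hf]
        · have hge : -1 ≤ PySem.Chars.find t sub := PySem.Chars.neg_one_le_find t sub
          have h0 : 0 ≤ PySem.Chars.find t sub := by omega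
          rw [if_neg hf, if_neg (by omega), ih, if_neg hf]
          have htn : (1 + PySem.Chars.find t sub).toNat
              = 1 + (PySem.Chars.find t sub).toNat := by omega
          rw [htn, Nat.add_assoc,
             show (1 + ((PySem.Chars.find t sub).toNat + sub.length)) = ((PySem.Chars.find t sub).toNat + sub.length) + 1 from Nat.add_comm _ _,
             List.drop_succ_cons]

lemma count_zero (sub : List Char) (hsub : sub ≠ []) (s : List Char) :
    PySem.Chars.count s sub = 0 ↔ PySem.Chars.find s sub = -1 := by
  rw [count_find sub hsub s]
  split
  · simp [*]
  · simp [*]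

lemma count_one (sub : List Char) (hsub : sub ≠ []) (s : List Char) :
    PySem.Chars.count s sub = 1 ↔
      (0 ≤ PySem.Chars.find s sub ∧
       PySem.Chars.find (List.drop ((PySem.Chars.find s sub).toNat + sub.length) s) sub = -1) := by
  have hge : -1 ≤ PySem.Chars.find s sub := PySem.Chars.neg_one_le_find s sub
  rw [count_find sub hsub s]
  split
  · constructor
    · omega
    · intro ⟨h1, _⟩; omega
  · rw [← count_zero sub hsub]
    constructor
    · intro hh; exact ⟨by omega, by omega⟩
    · intro ⟨_, h2⟩; omega

lemma occ_chars (s sub : List Char) :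
    ((PySem.Chars.count s sub : Int) == 1) =
      (if PySem.Chars.find s sub < 0 then false
       else decide (PySem.Chars.findFrom s sub
              (PySem.Chars.find s sub + max ((sub.length : Int)) 1) none < 0)) := by
  by_cases hsub : sub = []
  · subst hsub
    simp only [PySem.Chars.find_nil, List.length_nil, Nat.cast_zero]
    rw [if_neg (by omega)]
    have hmax : (0 : Int) + max 0 1 = ((1 : Nat) : Int) := by simp
    rw [hmax]
    cases s with
    | nil => simp [PySem.Chars.count, PySem.Chars.findFrom]
    | cons a t =>
        have h1 : (1 : Nat) ≤ (a :: t).length := by simp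
        rw [PySem.Chars.findFrom_natCast _ _ 1 h1]
        simp [PySem.Chars.count, PySem.Chars.find_nil]
        omega
  · have hge : -1 ≤ PySem.Chars.find s sub := PySem.Chars.neg_one_le_find s sub
    by_cases hf : PySem.Chars.find s sub = -1
    · rw [if_pos (by omega)]
      have h0 : PySem.Chars.count s sub = 0 := (count_zero sub hsub s).mpr hf
      simp [h0]
    · have h0 : 0 ≤ PySem.Chars.find s sub := by omega
      rw [if_neg (by omega)]
      have hL : 1 ≤ sub.length := Nat.one_le_iff_ne_zero.mpr (by simpa using hsub)
      have hmax : max ((sub.length : Nat) : Int) 1 = ((sub.length : Nat) : Int) := by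
        simp
        omega
      have hcast : PySem.Chars.find s sub + max ((sub.length : Nat) : Int) 1
          = (((PySem.Chars.find s sub).toNat + sub.length : Nat) : Int) := by
        rw [hmax]; push_cast; omega
      have hkle : (PySem.Chars.find s sub).toNat + sub.length ≤ s.length := by
        have hspec := (PySem.Chars.find_spec (s := s) (sub := sub) h0).1
        have hle := hspec.length_le
        have hfl := PySem.Chars.find_le_length s sub
        simp only [List.length_drop] at hle
        omega
      rw [hcast, PySem.Chars.findFrom_natCast _ _ _ hkle]
      by_cases hz : PySem.Chars.find
          (List.drop ((PySem.Chars.find s sub).toNat + sub.length) s) sub = -1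
      · have hc1 : PySem.Chars.count s sub = 1 := (count_one sub hsub s).mpr ⟨h0, hz⟩
        simp [hc1, hz]
      · have hge2 : -1 ≤ PySem.Chars.find
            (List.drop ((PySem.Chars.find s sub).toNat + sub.length) s) sub :=
          PySem.Chars.neg_one_le_find _ _
        have hne1 : PySem.Chars.count s sub ≠ 1 := by
          intro hc
          exact hz ((count_one sub hsub s).mp hc).2
        rw [if_neg hz]
        have hfalse : ((PySem.Chars.count s sub : Int) == 1) = false := by
          simp
          omega
        rw [hfalse]
        simp
        omega

lemma occ_eq (w c : String) : ((PySem.Str.count w c : Int) == 1) = occursExactlyOnce w c := by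
  simp only [occursExactlyOnce, PySem.Str.find_eq, PySem.Str.findFrom_eq, PySem.Str.count_eq,
    PySem.Str.len_eq]
  exact occ_chars w.toList c.toList


lemma zip_map_app (f : String → List Int) (g : String → Int) :
    ∀ (dic : List String),
      ((dic.map f).zip dic).map (fun p => p.1 ++ [g p.2]) = dic.map (fun w => f w ++ [g w]) := by
  intro dic; induction dic with
  | nil => rfl
  | cons w ws ih => simp [ih]

lemma fold_inv (dic : List String) :
    ∀ (spell : List String) (f : String → List Int) (al : List Int),
      spell.foldl
        (fun (st : List (List Int) × List Int) i =>
          (((st.1.zip dic).map (fun p => p.1 ++ [(PySem.Str.count p.2 i : Int)])),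
           st.2 ++ [(1 : Int)]))
        (dic.map f, al)
      = (dic.map (fun w => f w ++ spell.map (fun c => (PySem.Str.count w c : Int))), al ++ spell.map (fun _ => (1 : Int))) := by
  intro spell
  induction spell with
  | nil => intro f al; simp
  | cons c cs ih =>
      intro f al
      simp only [List.foldl_cons]
      rw [zip_map_app f (fun w => (PySem.Str.count w c : Int)) dic,
          ih (fun w => f w ++ [(PySem.Str.count w c : Int)]) (al ++ [(1 : Int)])]
      simp

lemma contains_map_eq_any (dic : List String) (g : String → List Int) (t : List Int) :
    (dic.map g).contains t = dic.any (fun w => g w == t) := by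
  induction dic with
  | nil => rfl
  | cons w ws ih =>
      simp only [List.map_cons, List.contains_cons, List.any_cons, ih]
      congr 1
      rw [Bool.eq_iff_iff, beq_iff_eq, beq_iff_eq]
      exact eq_comm

-- ===== VERDICT (by name: the statement is the Claim_ definition above) =====
theorem solution_spec : Claim_equal_solution := by
  intro spell dic _
  unfold Spec_solution solution solution_alt
  rw [fold_inv dic spell (fun _ => ([] : List Int)) []]
  simp only [List.nil_append, contains_map_eq_any]
  have h : ∀ w : String,
      (List.map (fun c => (PySem.Str.count w c : Int)) spell == List.map (fun _ => (1 : Int)) spell)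
      = (spell.all fun c => occursExactlyOnce w c) := by
    intro w
    rw [Bool.eq_iff_iff, beq_iff_eq, List.map_eq_map_iff, List.all_eq_true]
    constructor
    · intro hh c hc
      rw [← occ_eq, beq_iff_eq]
      exact hh c hc
    · intro hh c hc
      have := hh c hc
      rw [← occ_eq, beq_iff_eq] at this
      exact this
  simp only [h]
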